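-- pv_equiv track=rewrite | github.com/jskim7018/leetcode_study | algorithm_study/2025/12/20251224/medium/LC_1997.py | firstDayBeenInAllRooms
-- ===== SOURCE A (Python) =====
-- from typing import List
--
-- def firstDayBeenInAllRooms(nextVisit: List[int]) -> int:
--     mod = 10**9 + 7
--     n = len(nextVisit)
--     time_taken = [0] * n
--
--     time = 0
--     for i, v in enumerate(nextVisit):
--         time_taken[i] = time
--         time += time_taken[i]
--         if v >= 0:
--             time -= time_taken[v]
--         time += 2
--         time %= mod
--
--     return time_taken[n-1]
-- ===== SOURCE B (Python) =====
-- def firstDayBeenInAllRooms(nextVisit):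
--     # Demand-driven top-down evaluation with an explicit stack, instead of A's
--     # bottom-up pass with a threaded `time` accumulator: room n-1's first day is
--     # demanded and dependencies (room j-1, and the back-visit room) are resolved
--     # via a work stack.  dp holds first-visit days; rooms not yet reached read 0.
--     mod = 10**9 + 7
--     n = len(nextVisit)
--     dp = [0] * n
--     done = [False] * n
--     done[0] = True          # room 0 is reached on day 0
--     stack = [n - 1]
--     while stack:
--         j = stack[-1]
--         if done[j]:
--             stack.pop()
--             continue
--         v = nextVisit[j - 1]
--         if not done[j - 1]:
--             stack.append(j - 1)
--         elif 0 <= v < j and not done[v]: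
--             stack.append(v)
--         else:
--             back = dp[v] if v >= 0 else 0
--             dp[j] = (2 * dp[j - 1] - back + 2) % mod
--             done[j] = True
--             stack.pop()
--     return dp[n - 1]
-- ===== Notes on version B (the rewrite author's own statement) =====
-- stated objective: alternative
-- what changed: B replaces A's bottom-up pass with a threaded `time` accumulator by demand-driven top-down evaluation: room n-1's first day is demanded and an explicit work stack resolves dependencies (room j-1 and the back-visit room), writing first-visit days into a dp array with a done marker.
import Mathlib
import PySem

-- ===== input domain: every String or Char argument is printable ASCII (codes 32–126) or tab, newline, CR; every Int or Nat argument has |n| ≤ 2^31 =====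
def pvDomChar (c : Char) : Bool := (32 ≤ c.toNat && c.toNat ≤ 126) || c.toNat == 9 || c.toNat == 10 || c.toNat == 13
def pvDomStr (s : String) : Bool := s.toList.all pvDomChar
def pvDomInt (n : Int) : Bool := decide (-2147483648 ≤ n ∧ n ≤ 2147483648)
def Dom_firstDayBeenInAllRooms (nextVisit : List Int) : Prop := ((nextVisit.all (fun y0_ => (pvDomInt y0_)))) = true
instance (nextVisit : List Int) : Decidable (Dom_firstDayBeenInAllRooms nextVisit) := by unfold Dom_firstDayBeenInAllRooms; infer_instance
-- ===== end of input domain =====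

-- B replaces A's bottom-up array pass with a threaded accumulator by demand-driven top-down
-- memoization (explicit stack + dict memo); equivalence is about the return value on Pre_.

-- ===== PORT A =====
-- the loop `for i, v in enumerate(nextVisit)`: state (time_taken, time); none = IndexError at time_taken[v]
def pvAgo (nextVisit : List (Int × Int)) (tt : List Int) (time : Int) : Option (List Int × Int) :=
  match nextVisit with
  | [] => some (tt, time)
  | (i, v) :: rest =>
      let tt1 := tt.set i.toNat time                    -- time_taken[i] = time (i ≥ 0, in range)
      match PySem.List.pyGet? tt1 i with                -- time += time_taken[i]
      | none => none
      | some ti =>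
        if v ≥ 0 then
          match PySem.List.pyGet? tt1 v with            -- time -= time_taken[v]  (IndexError possible)
          | none => none
          | some tv => pvAgo rest tt1 (PySem.Int.mod (time + ti - tv + 2) (10^9 + 7))
        else pvAgo rest tt1 (PySem.Int.mod (time + ti + 2) (10^9 + 7))

def firstDayBeenInAllRooms (nextVisit : List Int) : Int :=
  let n := nextVisit.length
  match pvAgo (PySem.List.enumerate nextVisit) (List.replicate n 0) 0 with
  | none => 0                                           -- Python raised IndexError: excluded by Pre_
  | some (tt, _) => (PySem.List.pyGet? tt ((n : Int) - 1)).getD 0   -- time_taken[n-1]; none (n = 0) excluded by Pre_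

-- ===== PORT B =====
-- the `while stack:` loop of Source B over state (dp, done); none = IndexError; the fuel
-- argument only makes the recursion total (3^(n+1) iterations are proved sufficient on
-- Pre_, see pv_processB below); one fuel tick = one loop iteration
def pvRun (nv : List Int) : Nat → List Int → List Int → List Bool → Option (List Int × List Bool)
  | 0, _, dp, done => some (dp, done)
  | _ + 1, [], dp, done => some (dp, done)
  | fuel + 1, j :: rest, dp, done =>
    match PySem.List.pyGet? done j with                       -- if done[j]
    | none => none
    | some b =>
      if b then pvRun nv fuel rest dp done                    -- stack.pop(); continue
      else
        match PySem.List.pyGet? nv (j - 1) with               -- v = nextVisit[j - 1]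
        | none => none
        | some v =>
          match PySem.List.pyGet? done (j - 1) with           -- if not done[j - 1]
          | none => none
          | some bprev =>
            if bprev = false then pvRun nv fuel ((j - 1) :: j :: rest) dp done
            else if 0 ≤ v ∧ v < j then                        -- elif 0 <= v < j and not done[v]
              match PySem.List.pyGet? done v with             -- done[v] (short-circuited)
              | none => none
              | some bv =>
                if bv = false then pvRun nv fuel (v :: j :: rest) dp done
                else                                          -- else: compute (here v ≥ 0)
                  match PySem.List.pyGet? dp v with           -- back = dp[v]
                  | none => none
                  | some back =>
                    match PySem.List.pyGet? dp (j - 1) with   -- dp[j - 1]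
                    | none => none
                    | some dpj =>                             -- dp[j] = …; done[j] = True (j ≥ 0 on every reachable stack)
                      pvRun nv fuel rest (dp.set j.toNat (PySem.Int.mod (2 * dpj - back + 2) (10 ^ 9 + 7))) (done.set j.toNat true)
            else                                              -- else: compute
              match (if 0 ≤ v then PySem.List.pyGet? dp v else some 0) with   -- back = dp[v] if v >= 0 else 0
              | none => none
              | some back =>
                match PySem.List.pyGet? dp (j - 1) with       -- dp[j - 1]
                | none => none
                | some dpj =>
                  pvRun nv fuel rest (dp.set j.toNat (PySem.Int.mod (2 * dpj - back + 2) (10 ^ 9 + 7))) (done.set j.toNat true)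

def firstDayBeenInAllRooms_alt (nextVisit : List Int) : Int :=
  let n := nextVisit.length
  let dp := List.replicate n 0
  let done := (List.replicate n false).set 0 true             -- done[0] = True; IndexError on [] excluded by Pre_
  match pvRun nextVisit (3 ^ (n + 1)) [(n : Int) - 1] dp done with
  | none => 0                                                 -- Python raised IndexError: excluded by Pre_
  | some (dp', _) => (PySem.List.pyGet? dp' ((n : Int) - 1)).getD 0   -- dp[n-1]

-- ===== PRECONDITION & SPEC =====
-- Pre_ = exactly the inputs where A returns: non-empty, and every entry < n (an entry v with v ≥ n
-- raises IndexError at time_taken[v]; negative entries are fine, the guard skips them).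
def Pre_firstDayBeenInAllRooms (nextVisit : List Int) : Prop :=
  nextVisit ≠ [] ∧ ∀ v ∈ nextVisit, v < (nextVisit.length : Int)
instance (nextVisit : List Int) : Decidable (Pre_firstDayBeenInAllRooms nextVisit) := by
  unfold Pre_firstDayBeenInAllRooms; infer_instance

def pvWitness_firstDayBeenInAllRooms : List Int := [0, 0, 1]

def Spec_firstDayBeenInAllRooms (nextVisit : List Int) (out : Int) : Prop := out = firstDayBeenInAllRooms_alt nextVisit
instance (nextVisit : List Int) (out : Int) : Decidable (Spec_firstDayBeenInAllRooms nextVisit out) := by unfold Spec_firstDayBeenInAllRooms; infer_instance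

-- ===== CLAIM (what is proved, stated in full; the proofs are below) =====
def Claim_equal_firstDayBeenInAllRooms : Prop := ∀ (nextVisit : List Int), Dom_firstDayBeenInAllRooms nextVisit → Pre_firstDayBeenInAllRooms nextVisit → Spec_firstDayBeenInAllRooms nextVisit (firstDayBeenInAllRooms nextVisit)

-- ===== LEMMAS AND PROOFS =====

-- the mathematical first-visit-day sequence both programs compute: dp 0 = 0,
-- dp (j+1) = (2*dp j - (dp v if 0 ≤ v ≤ j else 0) + 2) % (10^9+7) with v = nextVisit[j]
def dpSeq (nv : List Int) : Nat → Int
  | 0 => 0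
  | j + 1 =>
    let v := (PySem.List.pyGet? nv (j : Int)).getD 0
    let back := if _h : 0 ≤ v ∧ v < (j : Int) + 1 then dpSeq nv v.toNat else 0
    PySem.Int.mod (2 * dpSeq nv j - back + 2) (10 ^ 9 + 7)
decreasing_by all_goals omega

-- one unfolding of dpSeq, with the dite turned into an ite
lemma dpSeq_succ (nv : List Int) (i : Nat) :
    dpSeq nv (i + 1) =
      PySem.Int.mod (2 * dpSeq nv i -
        (if 0 ≤ (PySem.List.pyGet? nv (i : Int)).getD 0 ∧
            (PySem.List.pyGet? nv (i : Int)).getD 0 < (i : Int) + 1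
         then dpSeq nv ((PySem.List.pyGet? nv (i : Int)).getD 0).toNat else 0) + 2) (10 ^ 9 + 7) := by
  rw [dpSeq]
  split <;> rename_i h <;> simp

-- the loop invariant of B: the rooms marked done are exactly the prefix {0..t-1},
-- done rooms hold their dpSeq value and rooms not yet reached still hold 0
def stOk (nv : List Int) (dp : List Int) (done : List Bool) (t : Nat) : Prop :=
  dp.length = nv.length ∧ done.length = nv.length ∧ 1 ≤ t ∧
  (∀ k, k < nv.length → done[k]? = some (decide (k < t))) ∧
  (∀ k, k < nv.length → k < t → dp[k]? = some (dpSeq nv k)) ∧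
  (∀ k, k < nv.length → t ≤ k → dp[k]? = some (0 : Int))

lemma pvRun_nil (nv : List Int) (fuel : Nat) (dp : List Int) (done : List Bool) :
    pvRun nv fuel [] dp done = some (dp, done) := by cases fuel <;> rfl

-- the compute step: with rooms 0..m done, one iteration on stack entry m+1 computes room m+1
lemma pv_computeB (nv : List Int) (hpre : ∀ v ∈ nv, v < (nv.length : Int)) (m : Nat)
    (hm1 : m + 1 < nv.length) (f2 : Nat) (rest : List Int) (dp2 : List Int) (done2 : List Bool)
    (hst : stOk nv dp2 done2 (m + 1)) :
    pvRun nv (f2 + 1) (((m + 1 : Nat) : Int) :: rest) dp2 done2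
      = pvRun nv f2 rest (dp2.set (m + 1) (dpSeq nv (m + 1))) (done2.set (m + 1) true) ∧
    stOk nv (dp2.set (m + 1) (dpSeq nv (m + 1))) (done2.set (m + 1) true) (m + 2) := by
  obtain ⟨hdl, hdn, -, hdone, hdpa, hdpb⟩ := hst
  have hm : m < nv.length := by omega
  have hJ1 : ((m + 1 : Nat) : Int) - 1 = ((m : Nat) : Int) := by push_cast; ring
  have hdj : PySem.List.pyGet? done2 ((m + 1 : Nat) : Int) = some false := by
    rw [PySem.List.pyGet?_natCast, hdone (m + 1) (by omega)]
    simp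
  have hnvm : PySem.List.pyGet? nv ((m : Nat) : Int) = some nv[m] := by
    rw [PySem.List.pyGet?_natCast, List.getElem?_eq_getElem hm]
  have hvlt : nv[m] < (nv.length : Int) := hpre _ (List.getElem_mem hm)
  have hdm : PySem.List.pyGet? done2 ((m : Nat) : Int) = some true := by
    rw [PySem.List.pyGet?_natCast, hdone m (by omega)]
    simp
  have hdpm : PySem.List.pyGet? dp2 ((m : Nat) : Int) = some (dpSeq nv m) := by
    rw [PySem.List.pyGet?_natCast, hdpa m (by omega) (by omega)]
  -- the inserted value is dpSeq (m+1)
  have hval : ∀ back : Int,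
      back = (if 0 ≤ nv[m] ∧ nv[m] < ((m + 1 : Nat) : Int) then dpSeq nv nv[m].toNat else 0) →
      PySem.Int.mod (2 * dpSeq nv m - back + 2) (10 ^ 9 + 7) = dpSeq nv (m + 1) := by
    intro back hb
    rw [dpSeq_succ, hnvm]
    subst hb
    have : ((m + 1 : Nat) : Int) = ((m : Nat) : Int) + 1 := by push_cast; ring
    rw [this]
    rfl
  have hstOk : stOk nv (dp2.set (m + 1) (dpSeq nv (m + 1))) (done2.set (m + 1) true) (m + 2) := by
    refine ⟨by simp [hdl], by simp [hdn], by omega, ?_, ?_, ?_⟩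
    · intro k hk
      rw [List.getElem?_set]
      by_cases hkm : m + 1 = k
      · subst hkm
        rw [if_pos rfl, if_pos (by rw [hdn]; exact hm1)]
        simp
      · rw [if_neg hkm, hdone k hk]
        simp only [Option.some.injEq, decide_eq_decide]
        omega
    · intro k hk hk2
      rw [List.getElem?_set]
      by_cases hkm : m + 1 = k
      · subst hkm
        rw [if_pos rfl, if_pos (by rw [hdl]; exact hm1)]
      · rw [if_neg hkm, hdpa k hk (by omega)]
    · intro k hk hk2
      rw [List.getElem?_set, if_neg (by omega), hdpb k hk (by omega)]
  refine ⟨?_, hstOk⟩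
  rw [pvRun, hdj]
  show (if false = true then _ else _) = _
  rw [if_neg (by simp), hJ1, hnvm, hdm]
  show (if (true = false) then _ else _) = _
  rw [if_neg (by simp)]
  by_cases hg : 0 ≤ nv[m] ∧ nv[m] < ((m + 1 : Nat) : Int)
  · have hvn : nv[m].toNat < m + 1 := by omega
    have hdv : PySem.List.pyGet? done2 nv[m] = some true := by
      rw [PySem.List.pyGet?_of_nonneg _ hg.1, hdone nv[m].toNat (by omega)]
      simp [hvn]
    have hdpv : PySem.List.pyGet? dp2 nv[m] = some (dpSeq nv nv[m].toNat) := by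
      rw [PySem.List.pyGet?_of_nonneg _ hg.1, hdpa nv[m].toNat (by omega) hvn]
    rw [if_pos hg, hdv]
    show (if (true = false) then _ else _) = _
    rw [if_neg (by simp), hdpv, hdpm]
    simp only [Int.toNat_natCast]
    rw [hval _ (by rw [if_pos hg])]
  · rw [if_neg hg]
    have hback : (if 0 ≤ nv[m] then PySem.List.pyGet? dp2 nv[m] else some 0) = some 0 := by
      by_cases h0v : 0 ≤ nv[m]
      · rw [if_pos h0v, PySem.List.pyGet?_of_nonneg _ h0v,
          hdpb nv[m].toNat (by omega) (by omega)]
      · rw [if_neg h0v]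
    rw [hback, hdpm]
    simp only [Int.toNat_natCast]
    rw [hval 0 (by rw [if_neg hg])]

lemma pv_processB (nv : List Int) (hpre : ∀ v ∈ nv, v < (nv.length : Int)) :
    ∀ (j : Nat), j < nv.length →
    ∀ (fuel : Nat) (rest : List Int) (dp : List Int) (done : List Bool) (t : Nat),
      2 * j + 1 ≤ fuel → stOk nv dp done t → t ≤ j + 1 →
      ∃ (dp' : List Int) (done' : List Bool) (k : Nat), k ≤ 2 * j + 1 ∧ k ≤ fuel ∧
        pvRun nv fuel ((j : Int) :: rest) dp done = pvRun nv (fuel - k) rest dp' done' ∧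
        stOk nv dp' done' (j + 1) := by
  intro j
  induction j with
  | zero =>
      intro hj fuel rest dp done t hfuel hst ht
      obtain ⟨f, rfl⟩ : ∃ f, fuel = f + 1 := ⟨fuel - 1, by omega⟩
      obtain ⟨hdl, hdn, ht1, hdone, hdpa, hdpb⟩ := hst
      have ht0 : t = 1 := by omega
      subst ht0
      have hd0 : PySem.List.pyGet? done ((0 : Nat) : Int) = some true := by
        rw [PySem.List.pyGet?_natCast, hdone 0 (by omega)]
        simp
      refine ⟨dp, done, 1, by omega, by omega, ?_, ⟨hdl, hdn, by omega, hdone, hdpa, hdpb⟩⟩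
      rw [pvRun, hd0]
      norm_num
  | succ m IH =>
      intro hj fuel rest dp done t hfuel hst ht
      obtain ⟨f, rfl⟩ : ∃ f, fuel = f + 1 := ⟨fuel - 1, by omega⟩
      have hst' := hst
      obtain ⟨hdl, hdn, ht1, hdone, hdpa, hdpb⟩ := hst'
      have hdj : PySem.List.pyGet? done ((m + 1 : Nat) : Int) = some (decide (m + 1 < t)) := by
        rw [PySem.List.pyGet?_natCast, hdone (m + 1) (by omega)]
      by_cases hdone_j : m + 1 < t
      · -- room m+1 already computed: pop; t = m+2
        have ht2 : t = m + 2 := by omega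
        refine ⟨dp, done, 1, by omega, by omega, ?_, ht2 ▸ hst⟩
        rw [pvRun, hdj]
        simp [hdone_j]
      · by_cases hprev : m < t
        · -- predecessor done (t = m+1): one compute step
          have ht2 : t = m + 1 := by omega
          subst ht2
          obtain ⟨heq, hstOk⟩ := pv_computeB nv hpre m hj f rest dp done hst
          exact ⟨_, _, 1, by omega, by omega, by rw [heq]; norm_num, hstOk⟩
        · -- predecessor not done: push it, process it (IH), then one compute step
          have hJ1 : ((m + 1 : Nat) : Int) - 1 = ((m : Nat) : Int) := by push_cast; ring
          have hm : m < nv.length := by omega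
          have hnvm : PySem.List.pyGet? nv ((m : Nat) : Int) = some nv[m] := by
            rw [PySem.List.pyGet?_natCast, List.getElem?_eq_getElem hm]
          have hdm : PySem.List.pyGet? done ((m : Nat) : Int) = some false := by
            rw [PySem.List.pyGet?_natCast, hdone m (by omega)]
            simp
            omega
          have hstep1 : pvRun nv (f + 1) (((m + 1 : Nat) : Int) :: rest) dp done
              = pvRun nv f (((m : Nat) : Int) :: ((m + 1 : Nat) : Int) :: rest) dp done := by
            rw [pvRun, hdj]
            show (if (decide (m + 1 < t) = true) then _ else _) = _
            rw [if_neg (by simpa using hdone_j), hJ1, hnvm, hdm]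
            show (if (false = false) then _ else _) = _
            rw [if_pos rfl]
          obtain ⟨dp1, done1, k1, hk1a, hk1b, hrun1, hst1⟩ :=
            IH (by omega) f (((m + 1 : Nat) : Int) :: rest) dp done t (by omega) hst (by omega)
          obtain ⟨g, hg⟩ : ∃ g, f - k1 = g + 1 := ⟨f - k1 - 1, by omega⟩
          obtain ⟨heq, hstOk⟩ := pv_computeB nv hpre m hj g rest dp1 done1 hst1
          refine ⟨_, _, k1 + 2, by omega, by omega, ?_, hstOk⟩
          rw [show f + 1 - (k1 + 2) = g from by omega, hstep1, hrun1, hg, heq]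

-- A-side invariant: from position i with time = dpSeq i and the prefix already written,
-- the loop returns a table tt' with tt'[j] = dpSeq j everywhere
lemma pvA_inv (nv : List Int) (hpre : ∀ v ∈ nv, v < (nv.length : Int)) :
    ∀ (rest : List Int) (i : Nat) (tt : List Int),
      nv.drop i = rest → tt.length = nv.length →
      (∀ (j : Nat) (hj : j < tt.length), tt[j] = if j < i then dpSeq nv j else 0) →
      ∃ (tt' : List Int) (tf : Int),
        pvAgo (PySem.List.enumerate rest (i : Int)) tt (dpSeq nv i) = some (tt', tf) ∧
        tt'.length = nv.length ∧
        ∀ (j : Nat) (hj : j < tt'.length), tt'[j] = dpSeq nv j := by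
  intro rest
  induction rest with
  | nil =>
      intro i tt hdrop hlen hinv
      have hle : nv.length ≤ i := by
        have := congrArg List.length hdrop; simp at this; omega
      refine ⟨tt, dpSeq nv i, by simp [pvAgo, PySem.List.enumerate], hlen, ?_⟩
      intro j hj
      rw [hinv j hj, if_pos (by omega)]
  | cons v rest' ih =>
      intro i tt hdrop hlen hinv
      have hi : i < nv.length := by
        by_contra h
        rw [List.drop_eq_nil_of_le (by omega)] at hdrop
        exact List.cons_ne_nil _ _ hdrop.symm
      have hcons : nv.drop i = nv[i] :: nv.drop (i + 1) := List.drop_eq_getElem_cons hi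
      rw [hdrop] at hcons
      have hv : nv[i] = v := by injection hcons with h1 _; exact h1.symm
      have hdrop' : nv.drop (i + 1) = rest' := by injection hcons with _ h2; exact h2.symm
      have hvm : v < (nv.length : Int) := hv ▸ hpre _ (List.getElem_mem hi)
      have hnvi : (PySem.List.pyGet? nv (i : Int)).getD 0 = v := by
        rw [PySem.List.pyGet?_natCast, List.getElem?_eq_getElem hi, hv]; rfl
      -- the write: tt1 = tt.set i (dpSeq nv i)
      have hset_len : (tt.set i (dpSeq nv i)).length = nv.length := by simp [hlen]
      have htt1 : ∀ (j : Nat) (hj : j < (tt.set i (dpSeq nv i)).length),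
          (tt.set i (dpSeq nv i))[j] = if j < i + 1 then dpSeq nv j else 0 := by
        intro j hj
        rw [List.getElem_set]
        by_cases hji : i = j
        · simp [hji]
        · rw [if_neg hji, hinv j (by simpa using hj)]
          by_cases hj2 : j < i
          · rw [if_pos hj2, if_pos (by omega)]
          · rw [if_neg hj2, if_neg (by omega)]
      have hget_i : PySem.List.pyGet? (tt.set i (dpSeq nv i)) (i : Int) = some (dpSeq nv i) := by
        rw [PySem.List.pyGet?_natCast, List.getElem?_eq_getElem (by omega),
          htt1 i (by omega), if_pos (by omega)]
      rw [PySem.List.enumerate_cons]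
      simp only [pvAgo, Int.toNat_natCast, hget_i]
      have hcast : ((i : Int) + 1) = ((i + 1 : Nat) : Int) := by push_cast; ring
      by_cases hv0 : v ≥ 0
      · -- time_taken[v] read succeeds: 0 ≤ v < n
        have hvn : v.toNat < (tt.set i (dpSeq nv i)).length := by omega
        have hget_v : PySem.List.pyGet? (tt.set i (dpSeq nv i)) v
            = some ((tt.set i (dpSeq nv i))[v.toNat]) := by
          rw [PySem.List.pyGet?_of_nonneg _ hv0, List.getElem?_eq_getElem hvn]
        rw [if_pos hv0, hget_v]
        dsimp only
        have hstep : PySem.Int.mod (dpSeq nv i + dpSeq nv i - (tt.set i (dpSeq nv i))[v.toNat] + 2)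
            (10 ^ 9 + 7) = dpSeq nv (i + 1) := by
          rw [dpSeq_succ, hnvi, htt1 v.toNat hvn]
          by_cases hvi : v.toNat < i + 1
          · rw [if_pos hvi, if_pos (by constructor <;> omega)]; ring_nf
          · rw [if_neg hvi, if_neg (by omega)]; ring_nf
        rw [hstep, hcast]
        exact ih (i + 1) _ hdrop' hset_len htt1
      · rw [if_neg hv0]
        have hstep : PySem.Int.mod (dpSeq nv i + dpSeq nv i + 2) (10 ^ 9 + 7) = dpSeq nv (i + 1) := by
          rw [dpSeq_succ, hnvi, if_neg (by omega)]; ring_nf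
        rw [hstep, hcast]
        exact ih (i + 1) _ hdrop' hset_len htt1

-- ===== VERDICT (by name: the statement is the Claim_ definition above) =====
theorem firstDayBeenInAllRooms_spec : Claim_equal_firstDayBeenInAllRooms := by
  intro nv _ hpre
  obtain ⟨hne, hlt⟩ := hpre
  have hn : 1 ≤ nv.length := by cases nv with | nil => exact absurd rfl hne | cons a l => simp
  -- A's value is dpSeq (n-1)
  obtain ⟨tt', tf, heq, hlen, hval⟩ := pvA_inv nv hlt nv 0 (List.replicate nv.length 0) rfl
    (by simp) (by intro j hj; simp)
  have h0 : dpSeq nv 0 = 0 := by simp [dpSeq]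
  rw [h0] at heq
  -- B's value is dpSeq (n-1)
  have hst0 : stOk nv (List.replicate nv.length 0) ((List.replicate nv.length false).set 0 true) 1 := by
    refine ⟨by simp, by simp, le_refl 1, ?_, ?_, ?_⟩
    · intro k hk
      rw [List.getElem?_set]
      by_cases hk0 : k = 0
      · simp [hk0, hne]
      · simp [Ne.symm hk0, hk]
        omega
    · intro k hk hk1
      have hk0 : k = 0 := by omega
      subst hk0
      rw [List.getElem?_replicate_of_lt hk, h0]
    · intro k hk hk1
      simp [hk]
  have h2n : 2 * (nv.length - 1) + 1 ≤ 3 ^ (nv.length + 1) := by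
    have hp : nv.length < 3 ^ nv.length := Nat.lt_pow_self (by norm_num)
    have hps : (3 : Nat) ^ (nv.length + 1) = 3 * 3 ^ nv.length := by ring
    omega
  obtain ⟨dp', done', k, hka, hkb, hrun, hst'⟩ :=
    pv_processB nv hlt (nv.length - 1) (by omega) (3 ^ (nv.length + 1)) []
      (List.replicate nv.length 0) ((List.replicate nv.length false).set 0 true) 1
      h2n hst0 (by omega)
  rw [pvRun_nil] at hrun
  obtain ⟨-, -, -, -, hdpv, -⟩ := hst'
  have hget : dp'[nv.length - 1]? = some (dpSeq nv (nv.length - 1)) :=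
    hdpv _ (by omega) (by omega)
  show firstDayBeenInAllRooms nv = firstDayBeenInAllRooms_alt nv
  unfold firstDayBeenInAllRooms firstDayBeenInAllRooms_alt
  dsimp only
  have hcast : ((nv.length : Int) - 1) = ((nv.length - 1 : Nat) : Int) := by omega
  rw [hcast, hrun]
  rw [show ((0 : Nat) : Int) = (0 : Int) from rfl] at heq
  rw [heq]
  dsimp only
  have hj : nv.length - 1 < tt'.length := by omega
  rw [PySem.List.pyGet?_natCast, List.getElem?_eq_getElem hj, hval _ hj,
    PySem.List.pyGet?_natCast, hget]
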